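-- pv_equiv track=rewrite | github.com/Progambler227788/CP-CompetativeProgramming | 800 Ratings/1900.py | solve
-- ===== SOURCE A (Python) =====
-- def solve(n,array):
--     count = 0
--     i = 0
--     while i < n:
--         consectives = 0
--         while i<n and array[i] == '.':
--               consectives+=1
--               i+=1
--
--         if consectives>=3:
--            return 2
--         else:
--             count+=consectives
--         i+=1
--     return count
-- ===== SOURCE B (Python) =====
-- def solve(n, array):
--     chunk = array[:max(n, 0)]
--     marks = ''.join('.' if x == '.' else 'x' for x in chunk)
--     return 2 if '...' in marks else sum(x == '.' for x in chunk)
-- ===== Notes on version B (the rewrite author's own statement) =====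
-- stated objective: simpler
-- what changed: Replaces A's nested index-driven while loops (run-length scanning with manual i bookkeeping) by a slice plus a marker string searched for the substring '...' and a generator sum of dots.
-- outside the precondition, e.g. on solve(5, ['.', '.', '.', 'x']): A returns 2, B returns 2
import Mathlib
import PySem

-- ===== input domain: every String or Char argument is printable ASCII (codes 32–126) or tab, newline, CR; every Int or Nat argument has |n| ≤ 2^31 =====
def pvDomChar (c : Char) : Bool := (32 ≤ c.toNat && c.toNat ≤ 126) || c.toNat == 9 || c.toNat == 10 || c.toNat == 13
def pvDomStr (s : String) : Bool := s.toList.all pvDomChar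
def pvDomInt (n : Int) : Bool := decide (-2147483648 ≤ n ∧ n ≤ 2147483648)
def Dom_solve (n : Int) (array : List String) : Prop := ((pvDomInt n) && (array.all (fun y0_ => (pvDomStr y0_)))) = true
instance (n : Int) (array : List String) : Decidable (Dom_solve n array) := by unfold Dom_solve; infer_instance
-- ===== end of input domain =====

-- B replaces A's nested index-driven while loops by a slice, a marker string searched for '...', and a generator sum of dots (objective: simpler).


-- ===== PORT A =====
-- termination measures for the two while loops (cited by name in decreasing_by)
theorem pvTermStep (n i : Int) (h : i < n) : (n - (i + 1)).toNat < (n - i).toNat :=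
  (Int.toNat_lt_toNat (sub_pos.mpr h)).mpr (sub_lt_sub_left (lt_add_one i) n)

theorem pvTermSkip (n i j : Int) (h : i < n) (h2 : i ≤ j) :
    (n - (j + 1)).toNat < (n - i).toNat :=
  (Int.toNat_lt_toNat (sub_pos.mpr h)).mpr (sub_lt_sub_left (Int.lt_add_one_iff.mpr h2) n)

-- inner loop: while i < n and array[i] == '.': consectives += 1; i += 1
-- (pyGet? = none is where Python raises IndexError; those inputs are outside Pre_solve)
def solveInner (array : List String) (n i consectives : Int) : Int × Int :=
  if h : i < n then
    match PySem.List.pyGet? array i with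
    | none => (consectives, i)
    | some x =>
        if x = "." then solveInner array n (i + 1) (consectives + 1)
        else (consectives, i)
  else (consectives, i)
termination_by (n - i).toNat
decreasing_by exact pvTermStep n i h

-- the outer loop's termination needs: the inner loop does not move i backwards
theorem solveInner_le (array : List String) (n i consectives : Int) :
    i ≤ (solveInner array n i consectives).2 := by
  unfold solveInner
  split
  · split
    · simp
    · split
      · have := solveInner_le array n (i + 1) (consectives + 1)
        omega
      · simp
  · simp
termination_by (n - i).toNat
decreasing_by exact pvTermStep n i ‹i < n›

-- outer loop: while i < n: consectives = 0; <inner>; if consectives >= 3: return 2 else count += consectives; i += 1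
def solveOuter (array : List String) (n i count : Int) : Int :=
  if h : i < n then
    let p := solveInner array n i 0
    if 3 ≤ p.1 then 2
    else solveOuter array n (p.2 + 1) (count + p.1)
  else count
termination_by (n - i).toNat
decreasing_by exact pvTermSkip n i (solveInner array n i 0).2 h (solveInner_le array n i 0)

def solve (n : Int) (array : List String) : Int := solveOuter array n 0 0

-- ===== PORT B =====
def solve_alt (n : Int) (array : List String) : Int :=
  let chunk := PySem.List.slice array none (some (max n 0))
  let marks : List Char :=
    PySem.Chars.join [] (chunk.map (fun x => if x = "." then ['.'] else ['x']))
  if PySem.Chars.isIn ['.', '.', '.'] marks then 2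
  else (chunk.map (fun x => if x = "." then (1 : Int) else 0)).sum

-- ===== PRECONDITION & SPEC =====
-- Pre_solve restricts to the natural domain n ≤ len(array) (n is the declared length); for
-- n > len(array) A's scan falls off the end with IndexError except when an early 'return 2' fires first.
def Pre_solve (n : Int) (array : List String) : Prop := n ≤ (array.length : Int)
instance (n : Int) (array : List String) : Decidable (Pre_solve n array) := by unfold Pre_solve; infer_instance

def pvWitness_solve : Int × List String := (4, [".", ".", "x", "."])

def Spec_solve (n : Int) (array : List String) (out : Int) : Prop := out = solve_alt n array
instance (n : Int) (array : List String) (out : Int) : Decidable (Spec_solve n array out) := by unfold Spec_solve; infer_instance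

-- ===== CLAIM (what is proved, stated in full; the proofs are below) =====
def Claim_equal_solve : Prop := ∀ (n : Int) (array : List String), Dom_solve n array → Pre_solve n array → Spec_solve n array (solve n array)

-- ===== LEMMAS AND PROOFS =====

-- "is there a run of ≥ 3 consecutive '.' elements?"
def hasRun3 : List String → Bool
  | a :: b :: c :: t => (a == "." && b == "." && c == ".") || hasRun3 (b :: c :: t)
  | _ => false

def dotMark (x : String) : Char := if x = "." then '.' else 'x'

theorem pvTermDrop (a : String) (t : List String) (k : Nat) :
    ((a :: t).drop (k + 1)).length < (a :: t).length := by
  simp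

-- reference scan: consume a maximal dot run, stop at 2 if it has ≥ 3 dots, else skip the separator
def runSpec (L : List String) (cnt : Int) : Int :=
  match h : L with
  | [] => cnt
  | _ :: _ =>
      let k := (L.takeWhile (fun x => x == ".")).length
      if 3 ≤ k then 2 else runSpec (L.drop (k + 1)) (cnt + k)
termination_by L.length
decreasing_by subst h; exact pvTermDrop _ _ _

theorem drop_takeWhile (p : String → Bool) (l : List String) :
    l.drop (l.takeWhile p).length = l.dropWhile p := by
  have h := List.takeWhile_append_dropWhile (p := p) (l := l)
  calc l.drop (l.takeWhile p).length
      = ((l.takeWhile p ++ l.dropWhile p)).drop (l.takeWhile p).length := by rw [h]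
    _ = l.dropWhile p := List.drop_left

theorem inner_eq (array : List String) (n : Int) (hn : n ≤ (array.length : Int)) :
    ∀ (d : Nat) (i c : Int), 0 ≤ i → (n - i).toNat = d →
      solveInner array n i c =
        (c + (((array.take n.toNat).drop i.toNat).takeWhile (fun x => x == ".")).length,
         i + (((array.take n.toNat).drop i.toNat).takeWhile (fun x => x == ".")).length) := by
  intro d
  induction d using Nat.strong_induction_on with
  | _ d ih =>
    intro i c hi hd
    rw [solveInner]
    by_cases hin : i < n
    · have hlt : i.toNat < array.length := by omega
      have hlt' : i.toNat < (array.take n.toNat).length := by simp; omega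
      have hget : PySem.List.pyGet? array i = some (array[i.toNat]) := by
        rw [PySem.List.pyGet?_of_nonneg array hi]
        simp [List.getElem?_eq_getElem hlt]
      have hview : (array.take n.toNat).drop i.toNat
          = array[i.toNat] :: ((array.take n.toNat).drop (i.toNat + 1)) := by
        rw [List.drop_eq_getElem_cons hlt']
        simp [List.getElem_take]
      rw [dif_pos hin, hget]
      dsimp only
      by_cases hdot : array[i.toNat] = "."
      · have hstep : (i + 1).toNat = i.toNat + 1 := by omega
        rw [if_pos hdot,
          ih (n - (i + 1)).toNat (by omega) (i + 1) (c + 1) (by omega) rfl]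
        rw [hview, List.takeWhile_cons]
        simp only [hdot, hstep]
        simp [Prod.ext_iff]
        constructor <;> omega
      · rw [if_neg hdot, hview, List.takeWhile_cons]
        have : (array[i.toNat] == ".") = false := by simp [hdot]
        simp [this]
    · have hnil : (array.take n.toNat).drop i.toNat = [] := by
        apply List.drop_eq_nil_of_le
        simp
        omega
      rw [dif_neg hin]
      simp [hnil]

theorem outer_eq (array : List String) (n : Int) (hn : n ≤ (array.length : Int)) :
    ∀ (d : Nat) (i count : Int), 0 ≤ i → (n - i).toNat = d →
      solveOuter array n i count = runSpec ((array.take n.toNat).drop i.toNat) count := by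
  intro d
  induction d using Nat.strong_induction_on with
  | _ d ih =>
    intro i count hi hd
    rw [solveOuter]
    by_cases hin : i < n
    · rw [dif_pos hin, inner_eq array n hn _ i 0 hi rfl]
      have hlen : ((array.take n.toNat).drop i.toNat).length = n.toNat - i.toNat := by
        simp; omega
      have hpos : ((array.take n.toNat).drop i.toNat) ≠ [] := by
        intro hnil
        rw [hnil] at hlen
        simp at hlen
        omega
      obtain ⟨a, t, hM⟩ := List.exists_cons_of_ne_nil hpos
      rw [hM, runSpec]
      set k := ((a :: t).takeWhile (fun x => x == ".")).length with hk
      have hkle : k ≤ (a :: t).length := (List.takeWhile_prefix _).length_le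
      by_cases h3 : 3 ≤ k
      · rw [if_pos h3, if_pos (by simp; omega)]
      · rw [if_neg h3, if_neg (by simp; omega)]
        have hdrop : (array.take n.toNat).drop (i + ↑k + 1).toNat = (a :: t).drop (k + 1) := by
          rw [← hM]
          rw [List.drop_drop]
          congr 1
          omega
        have := ih (n - (i + ↑k + 1)).toNat
          (by rw [hM] at hlen; simp at hlen; omega)
          (i + ↑k + 1) (count + ↑k) (by omega) rfl
        rw [hdrop] at this
        rw [show (0 : Int) + ↑k = (↑k : Int) by ring] at *
        rw [this]
    · rw [dif_neg hin]
      have hnil : (array.take n.toNat).drop i.toNat = [] := by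
        apply List.drop_eq_nil_of_le
        simp
        omega
      rw [hnil, runSpec]

theorem hasRun3_cons_not (x : String) (xs : List String) (hx : x ≠ ".") :
    hasRun3 (x :: xs) = hasRun3 xs := by
  cases xs with
  | nil => rfl
  | cons b t =>
    cases t with
    | nil => rfl
    | cons c u => simp [hasRun3, hx]

theorem hasRun3_mid_not (b c : String) (v : List String) (hc : c ≠ ".") :
    hasRun3 (b :: c :: v) = hasRun3 v := by
  cases v with
  | nil => rfl
  | cons d w =>
    rw [show hasRun3 (b :: c :: d :: w)
        = ((b == "." && c == "." && d == ".") || hasRun3 (c :: d :: w)) from rfl]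
    rw [hasRun3_cons_not c (d :: w) hc]
    simp [hc]

theorem hasRun3_of_takeWhile (L : List String)
    (h : 3 ≤ (L.takeWhile (fun x => x == ".")).length) : hasRun3 L = true := by
  match L with
  | [] => simp at h
  | [a] =>
    have := (List.takeWhile_prefix (l := [a]) (fun x => x == ".")).length_le
    simp only [List.length_cons, List.length_nil] at this
    omega
  | [a, b] =>
    have := (List.takeWhile_prefix (l := [a, b]) (fun x => x == ".")).length_le
    simp only [List.length_cons, List.length_nil] at this
    omega
  | a :: b :: c :: t =>
    by_cases ha : a = "."
    · by_cases hb : b = "."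
      · by_cases hc : c = "."
        · simp [hasRun3, ha, hb, hc]
        · simp [ha, hb, hc] at h
      · simp [ha, hb] at h
    · simp [ha] at h

theorem hasRun3_drop (L : List String)
    (h : (L.takeWhile (fun x => x == ".")).length < 3) :
    hasRun3 L = hasRun3 (L.drop ((L.takeWhile (fun x => x == ".")).length + 1)) := by
  match L with
  | [] => simp [hasRun3]
  | a :: t =>
    by_cases ha : a = "."
    · match t with
      | [] => simp [ha, hasRun3]
      | b :: u =>
        by_cases hb : b = "."
        · match u with
          | [] => simp [ha, hb, hasRun3]
          | c :: v =>
            by_cases hc : c = "."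
            · exfalso
              simp [ha, hb, hc] at h
              omega
            · have hk : ((a :: b :: c :: v).takeWhile (fun x => x == ".")).length = 2 := by
                simp [ha, hb, hc]
              rw [hk]
              rw [show hasRun3 (a :: b :: c :: v)
                  = ((a == "." && b == "." && c == ".") || hasRun3 (b :: c :: v)) from rfl]
              rw [hasRun3_mid_not b c v hc]
              simp [hc]
        · have hk : ((a :: b :: u).takeWhile (fun x => x == ".")).length = 1 := by
            simp [ha, hb]
          rw [hk]
          simp only [List.drop_succ_cons]
          exact hasRun3_mid_not a b u hb
    · have hk : ((a :: t).takeWhile (fun x => x == ".")).length = 0 := by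
        simp [ha]
      rw [hk]
      simp only [List.drop_succ_cons, List.drop_zero]
      exact hasRun3_cons_not a t ha

theorem countP_run (L : List String) :
    (L.countP (fun x => x == ".") : Int) =
      ((L.takeWhile (fun x => x == ".")).length : Int) +
      ((L.drop ((L.takeWhile (fun x => x == ".")).length + 1)).countP (fun x => x == ".") : Int) := by
  set p : String → Bool := fun x => x == "." with hp
  have hsplit := List.takeWhile_append_dropWhile (p := p) (l := L)
  have htw : (L.takeWhile p).countP p = (L.takeWhile p).length :=
    List.countP_eq_length.mpr (fun a ha => List.mem_takeWhile_imp ha)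
  have hdw : L.drop ((L.takeWhile p).length + 1) = (L.dropWhile p).drop 1 := by
    rw [← List.drop_drop, drop_takeWhile]
  rw [hdw]
  cases hD : L.dropWhile p with
  | nil =>
    conv_lhs => rw [← hsplit]
    simp [hD, htw]
  | cons r R =>
    have hr : p r = false := by
      have hne : L.dropWhile p ≠ [] := by rw [hD]; simp
      have hhd := List.head_dropWhile_not p hne
      have : (L.dropWhile p).head hne = r := by
        simp only [hD, List.head_cons]
      rw [this] at hhd
      exact hhd
    conv_lhs => rw [← hsplit]
    rw [hD]
    simp [List.countP_append, htw, hr]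

theorem runSpec_closed (d : Nat) : ∀ (L : List String), L.length = d → ∀ (cnt : Int),
    runSpec L cnt = if hasRun3 L then 2 else cnt + (L.countP (fun x => x == ".")) := by
  induction d using Nat.strong_induction_on with
  | _ d ih =>
    intro L hL cnt
    match L with
    | [] => simp [runSpec, hasRun3]
    | a :: t =>
      rw [runSpec]
      set k := ((a :: t).takeWhile (fun x => x == ".")).length with hk
      by_cases h3 : 3 ≤ k
      · rw [if_pos h3, hasRun3_of_takeWhile (a :: t) h3]
        simp
      · rw [if_neg h3]
        have hlt : ((a :: t).drop (k + 1)).length < d := by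
          simp [← hL]
        rw [ih _ hlt _ rfl]
        rw [← hasRun3_drop (a :: t) (by omega)]
        have hcount := countP_run (a :: t)
        rw [← hk] at hcount
        by_cases hR : hasRun3 (a :: t)
        · simp [hR]
        · simp only [hR, if_false, Bool.false_eq_true]
          omega

theorem infix_iff_hasRun3 (L : List String) :
    (['.', '.', '.'] <:+: L.map dotMark) ↔ hasRun3 L = true := by
  induction L with
  | nil => simp [hasRun3]
  | cons a t ih =>
    rw [List.map_cons, List.infix_cons_iff]
    have hmark : ∀ x : String, dotMark x = '.' ↔ x = "." := by
      intro x
      unfold dotMark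
      split <;> simp_all
    constructor
    · rintro (hpre | hinf)
      · match t with
        | [] => simp [List.cons_prefix_cons] at hpre
        | [b] => simp [List.cons_prefix_cons] at hpre
        | b :: c :: u =>
          simp only [List.map_cons, List.cons_prefix_cons] at hpre
          obtain ⟨h1, h2, h3, -⟩ := hpre
          have h1' := (hmark a).mp h1.symm
          have h2' := (hmark b).mp h2.symm
          have h3' := (hmark c).mp h3.symm
          simp [hasRun3, h1', h2', h3']
      · have := ih.mp hinf
        match t with
        | [] => simp [hasRun3] at this
        | [b] => simp [hasRun3] at this
        | b :: c :: u => simp [hasRun3, this]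
    · intro hR
      match t with
      | [] => simp [hasRun3] at hR
      | [b] => simp [hasRun3] at hR
      | b :: c :: u =>
        rw [show hasRun3 (a :: b :: c :: u)
            = ((a == "." && b == "." && c == ".") || hasRun3 (b :: c :: u)) from rfl] at hR
        rcases Bool.or_eq_true_iff.mp hR with h | h
        · left
          simp only [Bool.and_eq_true, beq_iff_eq] at h
          obtain ⟨⟨h1, h2⟩, h3⟩ := h
          simp [List.cons_prefix_cons, dotMark, h1, h2, h3]
        · right
          exact ih.mpr h

theorem alt_closed (n : Int) (array : List String) (_hn : n ≤ (array.length : Int)) :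
    solve_alt n array =
      if hasRun3 (array.take n.toNat) then 2
      else ((array.take n.toNat).countP (fun x => x == ".") : Int) := by
  unfold solve_alt
  dsimp only
  have hmax : (0 : Int) ≤ max n 0 := le_max_right n 0
  have htn : (max n 0).toNat = n.toNat := by omega
  rw [PySem.List.slice_to array hmax, htn]
  set chunk := array.take n.toNat with hchunk
  have hmap : chunk.map (fun x => if x = "." then (['.'] : List Char) else ['x'])
      = (chunk.map dotMark).map (fun c => [c]) := by
    rw [List.map_map]
    apply List.map_congr_left
    intro x _
    simp [Function.comp, dotMark, apply_ite (fun c : Char => [c])]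
  rw [hmap, PySem.Chars.join_nil_singletons]
  have hisin : PySem.Chars.isIn ['.', '.', '.'] (chunk.map dotMark) = hasRun3 chunk :=
    Bool.coe_iff_coe.mp ((PySem.Chars.isIn_iff_infix _ _).trans (infix_iff_hasRun3 chunk))
  rw [hisin]
  by_cases hR : hasRun3 chunk
  · simp [hR]
  · simp only [hR, if_false, Bool.false_eq_true]
    have := PySem.List.sum_map_ite_one_zero (fun x : String => x == ".") chunk
    simpa using this

-- ===== VERDICT (by name: the statement is the Claim_ definition above) =====
theorem solve_spec : Claim_equal_solve := by
  intro n array _ hpre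
  unfold Spec_solve solve
  have h0 : solveOuter array n 0 0 = runSpec (array.take n.toNat) 0 :=
    (outer_eq array n hpre _ 0 0 le_rfl rfl).trans (by simp)
  rw [h0, alt_closed n array hpre, runSpec_closed _ _ rfl]
  simp
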